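-- pv_equiv track=rewrite | github.com/MikyPelle/Python_SistemiEReti | ES_ROBOT.py | diz_to_mat
-- ===== SOURCE A (Python) =====
-- def diz_to_mat(adj_dict):
--
--     nodes = sorted(adj_dict.keys())
--     node_index = {node: idx for idx, node in enumerate(nodes)}
--     size = len(nodes)
--     adjacency_matrix = [[0] * size for _ in range(size)]
--     for node, neighbors in adj_dict.items():
--         for neighbor in neighbors:
--             adjacency_matrix[node_index[node]][node_index[neighbor]] = 1
--
--     return adjacency_matrix
-- ===== SOURCE B (Python) =====
-- def diz_to_mat(adj_dict):
--     nodes = sorted(adj_dict.keys())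
--     node_index = {node: idx for idx, node in enumerate(nodes)}
--     size = len(nodes)
--     return [[1 if j in {node_index[n] for n in adj_dict[node]} else 0
--              for j in range(size)]
--             for node in nodes]
-- ===== Notes on version B (the rewrite author's own statement) =====
-- stated objective: alternative
-- what changed: B builds the matrix row-by-row in sorted node order, testing each column against a per-row set of neighbor indices, instead of allocating a zero matrix and scatter-writing 1s while iterating the dict in insertion order.
import Mathlib
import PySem

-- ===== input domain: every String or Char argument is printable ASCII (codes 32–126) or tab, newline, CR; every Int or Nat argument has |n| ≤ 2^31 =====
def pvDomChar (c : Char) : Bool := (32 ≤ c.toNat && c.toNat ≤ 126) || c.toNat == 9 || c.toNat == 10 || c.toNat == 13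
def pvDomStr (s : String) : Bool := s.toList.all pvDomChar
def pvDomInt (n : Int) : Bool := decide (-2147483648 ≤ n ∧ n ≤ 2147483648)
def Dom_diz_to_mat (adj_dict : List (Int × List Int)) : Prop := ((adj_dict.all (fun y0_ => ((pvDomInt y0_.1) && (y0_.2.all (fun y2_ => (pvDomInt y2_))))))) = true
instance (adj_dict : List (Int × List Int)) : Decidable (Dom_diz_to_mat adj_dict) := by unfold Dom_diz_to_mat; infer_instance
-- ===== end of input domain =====

-- B builds the matrix row-by-row in sorted node order (per-row neighbor-index set, membership test per
-- column) instead of scatter-writing 1s into a preallocated zero matrix in dict order; same cost, no speed claim.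

-- node_index = {node: idx for idx, node in enumerate(nodes)}  (identical line in both A and B)
def pvNodeIndex (nodes : List Int) : PySem.Dict Int Int :=
  (PySem.List.enumerate nodes 0).foldl (fun m p => m.insert p.2 p.1) PySem.Dict.empty

-- ===== PORT A =====
def diz_to_mat (adj_dict : List (Int × List Int)) : List (List Int) :=
  let d := PySem.Dict.ofList adj_dict
  let nodes := PySem.List.sorted d.keys (fun x => x) false
  let node_index := pvNodeIndex nodes
  let size := nodes.length
  let mat0 := List.replicate size (List.replicate size (0 : Int))
  -- for node, neighbors in adj_dict.items(): for neighbor in neighbors: m[idx[node]][idx[neighbor]] = 1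
  d.items.foldl (fun mat p =>
    p.2.foldl (fun mat n =>
      PySem.List.pySetD mat (node_index.getD p.1 0)
        (PySem.List.pySetD (PySem.List.pyGetD mat (node_index.getD p.1 0) [])
          (node_index.getD n 0) 1)) mat) mat0

-- ===== PORT B =====
def diz_to_mat_alt (adj_dict : List (Int × List Int)) : List (List Int) :=
  let d := PySem.Dict.ofList adj_dict
  let nodes := PySem.List.sorted d.keys (fun x => x) false
  let node_index := pvNodeIndex nodes
  let size := nodes.length
  -- [[1 if j in {idx[n] for n in adj_dict[node]} else 0 for j in range(size)] for node in nodes]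
  nodes.map (fun node =>
    let idxSet : PySem.Set Int :=
      PySem.Set.ofList ((d.getD node []).map (fun n => node_index.getD n 0))
    (PySem.List.pyRange 0 size 1).map (fun j =>
      if PySem.Set.contains idxSet j then (1 : Int) else 0))

-- ===== PRECONDITION & SPEC =====
-- Pre_ excludes exactly the inputs on which A raises KeyError: a neighbor that is not itself a key of
-- the dict (node_index[neighbor] fails); B raises the same KeyError there.
def Pre_diz_to_mat (adj_dict : List (Int × List Int)) : Prop :=
  ∀ p ∈ (PySem.Dict.ofList adj_dict).items, ∀ n ∈ p.2,
    n ∈ (PySem.Dict.ofList adj_dict).keys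
instance (adj_dict : List (Int × List Int)) : Decidable (Pre_diz_to_mat adj_dict) := by
  unfold Pre_diz_to_mat; infer_instance
def pvWitness_diz_to_mat : (List (Int × List Int)) := [(2, [0, 2]), (0, [2])]

def Spec_diz_to_mat (adj_dict : List (Int × List Int)) (out : List (List Int)) : Prop := out = diz_to_mat_alt adj_dict
instance (adj_dict : List (Int × List Int)) (out : List (List Int)) : Decidable (Spec_diz_to_mat adj_dict out) := by unfold Spec_diz_to_mat; infer_instance

-- ===== CLAIM (what is proved, stated in full; the proofs are below) =====
def Claim_equal_diz_to_mat : Prop := ∀ (adj_dict : List (Int × List Int)), Dom_diz_to_mat adj_dict → Pre_diz_to_mat adj_dict → Spec_diz_to_mat adj_dict (diz_to_mat adj_dict)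

-- ===== LEMMAS AND PROOFS =====

theorem pvRowFold_length (g : Int → Int) (ns : List Int) (row : List Int) :
    (ns.foldl (fun r n => PySem.List.pySetD r (g n) 1) row).length = row.length := by
  induction ns generalizing row with
  | nil => rfl
  | cons n ns ih => simp [List.foldl_cons, ih, PySem.List.length_pySetD]

theorem pvRowFold_getD (g : Int → Int) (ns : List Int) (row : List Int)
    (hg : ∀ n ∈ ns, 0 ≤ g n ∧ (g n).toNat < row.length) (j : Nat) :
    (ns.foldl (fun r n => PySem.List.pySetD r (g n) 1) row).getD j 0
      = if ∃ n ∈ ns, g n = (j : Int) then 1 else row.getD j 0 := by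
  induction ns generalizing row with
  | nil => simp
  | cons n ns ih =>
    have hn := hg n (List.mem_cons_self ..)
    rw [List.foldl_cons, ih _ (by
      intro m hm
      have := hg m (List.mem_cons_of_mem _ hm)
      simpa [PySem.List.length_pySetD] using this)]
    rw [PySem.List.pySetD_of_nonneg (h := hn.1)]
    by_cases hex : ∃ m ∈ ns, g m = (j : Int)
    · simp [hex]
    · simp only [hex, if_false]
      by_cases hj : g n = (j : Int)
      · have : (g n).toNat = j := by omega
        simp [hj, List.getD_eq_getElem?_getD, (by omega : j < row.length)]
      · have hne : (g n).toNat ≠ j := by omega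
        have hnex : ¬ ∃ m ∈ n :: ns, g m = (j : Int) := by
          rintro ⟨m, hm, hgm⟩
          rcases List.mem_cons.mp hm with h' | h'
          · exact hj (h' ▸ hgm)
          · exact hex ⟨m, h', hgm⟩
        simp only [hnex, if_false]
        rw [List.getD_eq_getElem?_getD, List.getD_eq_getElem?_getD, List.getElem?_set_ne hne]

theorem pvInner (g : Int → Int) (r : Int) (hr : 0 ≤ r) (ns : List Int) (mat : List (List Int))
    (hlt : r.toNat < mat.length) :
    ns.foldl (fun m n =>
        PySem.List.pySetD m r (PySem.List.pySetD (PySem.List.pyGetD m r []) (g n) 1)) mat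
      = mat.set r.toNat
          (ns.foldl (fun row n => PySem.List.pySetD row (g n) 1) (mat.getD r.toNat [])) := by
  induction ns generalizing mat with
  | nil =>
    simp only [List.foldl_nil]
    rw [List.getD_eq_getElem?_getD, List.getElem?_eq_getElem hlt]
    simp
  | cons n ns ih =>
    rw [List.foldl_cons, List.foldl_cons]
    have hget : PySem.List.pyGetD mat r [] = mat.getD r.toNat [] := by
      rw [PySem.List.pyGetD_eq_getElem (h0 := hr) (h1 := by omega),
        List.getD_eq_getElem?_getD, List.getElem?_eq_getElem hlt]
      rfl
    rw [hget, PySem.List.pySetD_of_nonneg (h := hr)]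
    set row1 := PySem.List.pySetD (mat.getD r.toNat []) (g n) 1 with hrow1
    rw [ih _ (by simpa using hlt)]
    rw [List.set_set]
    congr 1
    rw [List.getD_eq_getElem?_getD, List.getElem?_set_self' ]
    simp [List.getElem?_eq_getElem hlt]

theorem pvMatFold_shape (g : Int → Int) (L : List (Int × List Int)) (mat : List (List Int))
    (hk : ∀ p ∈ L, 0 ≤ g p.1 ∧ (g p.1).toNat < mat.length) :
    (L.foldl (fun mat p =>
        p.2.foldl (fun m n =>
          PySem.List.pySetD m (g p.1) (PySem.List.pySetD (PySem.List.pyGetD m (g p.1) []) (g n) 1)) mat)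
      mat).length = mat.length := by
  induction L generalizing mat with
  | nil => rfl
  | cons p L ih =>
    have hp := hk p (List.mem_cons_self ..)
    rw [List.foldl_cons, pvInner g (g p.1) hp.1 p.2 mat hp.2,
      ih _ (by intro q hq; simpa using hk q (List.mem_cons_of_mem _ hq))]
    simp

theorem pvMatFold_rows (g : Int → Int) (size : Nat) (L : List (Int × List Int))
    (mat : List (List Int)) (hmat : mat.length = size)
    (hrows : ∀ row ∈ mat, row.length = size)
    (hk : ∀ p ∈ L, 0 ≤ g p.1 ∧ (g p.1).toNat < size) :
    ∀ row ∈ L.foldl (fun mat p =>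
        p.2.foldl (fun m n =>
          PySem.List.pySetD m (g p.1) (PySem.List.pySetD (PySem.List.pyGetD m (g p.1) []) (g n) 1)) mat)
      mat, row.length = size := by
  induction L generalizing mat with
  | nil => exact hrows
  | cons p L ih =>
    have hp := hk p (List.mem_cons_self ..)
    have hrt : (g p.1).toNat < mat.length := by omega
    rw [List.foldl_cons, pvInner g (g p.1) hp.1 p.2 mat hrt]
    refine ih _ (by simpa using hmat) ?_ (fun q hq => hk q (List.mem_cons_of_mem _ hq))
    intro row hrow
    rcases List.mem_or_eq_of_mem_set hrow with h | h
    · exact hrows _ h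
    · rw [h, pvRowFold_length]
      refine hrows _ ?_
      rw [List.getD_eq_getElem?_getD, List.getElem?_eq_getElem hrt]
      exact List.getElem_mem _

theorem pvMatFold_getD (g : Int → Int) (size : Nat) (L : List (Int × List Int))
    (mat : List (List Int)) (hmat : mat.length = size)
    (hrows : ∀ row ∈ mat, row.length = size)
    (hk : ∀ p ∈ L, 0 ≤ g p.1 ∧ (g p.1).toNat < size)
    (hg : ∀ p ∈ L, ∀ n ∈ p.2, 0 ≤ g n ∧ (g n).toNat < size)
    (i j : Nat) :
    ((L.foldl (fun mat p =>
        p.2.foldl (fun m n =>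
          PySem.List.pySetD m (g p.1) (PySem.List.pySetD (PySem.List.pyGetD m (g p.1) []) (g n) 1)) mat)
      mat).getD i []).getD j 0
    = if ∃ p ∈ L, g p.1 = (i : Int) ∧ ∃ n ∈ p.2, g n = (j : Int) then 1
      else (mat.getD i []).getD j 0 := by
  induction L generalizing mat with
  | nil => simp
  | cons p L ih =>
    have hp := hk p (List.mem_cons_self ..)
    have hrt : (g p.1).toNat < mat.length := by omega
    rw [List.foldl_cons, pvInner g (g p.1) hp.1 p.2 mat hrt]
    set rt := (g p.1).toNat with hrtdef
    have hrowmem : mat.getD rt [] ∈ mat := by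
      rw [List.getD_eq_getElem?_getD, List.getElem?_eq_getElem hrt]; exact List.getElem_mem _
    have hrowlen : (mat.getD rt []).length = size := hrows _ hrowmem
    set newrow := p.2.foldl (fun row n => PySem.List.pySetD row (g n) 1) (mat.getD rt []) with hnr
    have hnewlen : newrow.length = size := by rw [hnr, pvRowFold_length, hrowlen]
    rw [ih (mat.set rt newrow) (by simpa using hmat)
        (by intro row hrow
            rcases List.mem_or_eq_of_mem_set hrow with h | h
            · exact hrows _ h
            · rw [h]; exact hnewlen)
        (by intro q hq; exact hk q (List.mem_cons_of_mem _ hq))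
        (by intro q hq; exact hg q (List.mem_cons_of_mem _ hq))]
    by_cases hrest : ∃ q ∈ L, g q.1 = (i : Int) ∧ ∃ n ∈ q.2, g n = (j : Int)
    · obtain ⟨q, hq, hqc⟩ := hrest
      rw [if_pos ⟨q, hq, hqc⟩, if_pos ⟨q, List.mem_cons_of_mem _ hq, hqc⟩]
    · rw [if_neg hrest]
      by_cases hi : g p.1 = (i : Int)
      · have hieq : rt = i := by omega
        have hset : (mat.set rt newrow).getD i [] = newrow := by
          rw [hieq] at hrt ⊢
          rw [List.getD_eq_getElem?_getD, List.getElem?_set_self']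
          simp [List.getElem?_eq_getElem (by simpa using hrt)]
        rw [hset, hnr, pvRowFold_getD g p.2 _ (by
              intro n hn; have := hg p (List.mem_cons_self ..) n hn
              omega) j]
        rw [hieq]
        by_cases hin : ∃ n ∈ p.2, g n = (j : Int)
        · rw [if_pos hin, if_pos ⟨p, List.mem_cons_self .., hi, hin⟩]
        · rw [if_neg hin, if_neg (by
            rintro ⟨q, hq, hq1, hq2⟩
            rcases List.mem_cons.mp hq with h | h
            · exact hin (h ▸ hq2)
            · exact hrest ⟨q, h, hq1, hq2⟩)]
      · have hne : rt ≠ i := by omega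
        rw [if_neg (by
            rintro ⟨q, hq, hq1, hq2⟩
            rcases List.mem_cons.mp hq with h | h
            · exact hi (h ▸ hq1)
            · exact hrest ⟨q, h, hq1, hq2⟩)]
        congr 1
        rw [List.getD_eq_getElem?_getD, List.getD_eq_getElem?_getD, List.getElem?_set_ne hne]

theorem pvNodeIndex_items (nodes : List Int) (h : nodes.Nodup) :
    (pvNodeIndex nodes).items = (PySem.List.enumerate nodes 0).map (fun p => (p.2, p.1)) := by
  unfold pvNodeIndex
  have := PySem.Dict.items_foldl_insert_fresh (PySem.List.enumerate nodes 0)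
      (fun p => p.2) (fun p => p.1) PySem.Dict.empty
      (by intro a _; simp [PySem.Dict.contains_empty])
      (by rw [PySem.List.map_snd_enumerate]; exact h)
  simpa using this

theorem pvNodeIndex_keys (nodes : List Int) (h : nodes.Nodup) :
    (pvNodeIndex nodes).keys = nodes := by
  show ((pvNodeIndex nodes).items).map (·.1) = nodes
  rw [pvNodeIndex_items nodes h]
  simp [List.map_map]
  exact PySem.List.map_snd_enumerate nodes 0

theorem pvNodeIndex_getD (nodes : List Int) (h : nodes.Nodup) (t : Nat) (ht : t < nodes.length) :
    (pvNodeIndex nodes).getD nodes[t] 0 = (t : Int) := by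
  have hmem : (nodes[t], (t:Int)) ∈ (pvNodeIndex nodes).items := by
    rw [pvNodeIndex_items nodes h]
    refine List.mem_map.mpr ⟨((t:Int), nodes[t]), ?_, rfl⟩
    rw [PySem.List.mem_enumerate_iff]
    exact ⟨t, ht, by simp⟩
  have hnd : (pvNodeIndex nodes).keys.Nodup := by rw [pvNodeIndex_keys nodes h]; exact h
  exact PySem.Dict.getD_of_mem_items _ hmem hnd 0


theorem pv_getD_getElem (xs : List (List Int)) (i j : Nat) (hi : i < xs.length)
    (hj : j < (xs[i]'hi).length) : (xs[i]'hi)[j]'hj = (xs.getD i []).getD j 0 := by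
  rw [show xs.getD i [] = xs[i]'hi from by
        rw [List.getD_eq_getElem?_getD, List.getElem?_eq_getElem hi, Option.getD_some],
    List.getD_eq_getElem?_getD, List.getElem?_eq_getElem hj, Option.getD_some]

theorem pv_main (adj : List (Int × List Int)) (hPre : Pre_diz_to_mat adj) :
    diz_to_mat adj = diz_to_mat_alt adj := by
  have hknd : (PySem.Dict.ofList adj).keys.Nodup := PySem.Dict.nodup_keys_ofList adj
  set d := PySem.Dict.ofList adj with hd
  set nodes := PySem.List.sorted d.keys (fun x => x) false with hnodes
  have hperm : nodes.Perm d.keys := PySem.List.sorted_perm ..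
  have hnd : nodes.Nodup := hperm.nodup_iff.mpr hknd
  have hmemn : ∀ k, k ∈ nodes ↔ k ∈ d.keys := fun k => hperm.mem_iff
  set size := nodes.length with hsize
  set g : Int → Int := fun n => (pvNodeIndex nodes).getD n 0 with hg
  have hchar : ∀ k ∈ nodes, ∃ t : Nat, ∃ ht : t < size, nodes[t] = k ∧ g k = (t : Int) := by
    intro k hk
    obtain ⟨t, ht, rfl⟩ := List.getElem_of_mem hk
    exact ⟨t, ht, rfl, pvNodeIndex_getD nodes hnd t ht⟩
  have hbound : ∀ k ∈ d.keys, 0 ≤ g k ∧ (g k).toNat < size := by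
    intro k hk
    obtain ⟨t, ht, _, hgt⟩ := hchar k ((hmemn k).mpr hk)
    rw [hgt]; omega
  set mat0 := List.replicate size (List.replicate size (0 : Int)) with hmat0
  have hAdef : diz_to_mat adj
      = d.items.foldl (fun mat p =>
          p.2.foldl (fun m n =>
            PySem.List.pySetD m (g p.1)
              (PySem.List.pySetD (PySem.List.pyGetD m (g p.1) []) (g n) 1)) mat) mat0 := rfl
  have hBdef : diz_to_mat_alt adj
      = nodes.map (fun node =>
          (PySem.List.pyRange 0 (size : Int) 1).map (fun j =>
            if PySem.Set.contains
                (PySem.Set.ofList ((d.getD node []).map (fun n => g n))) j then (1 : Int)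
            else 0)) := rfl
  have hkb : ∀ p ∈ d.items, 0 ≤ g p.1 ∧ (g p.1).toNat < size := fun p hp =>
    hbound p.1 (PySem.Dict.mem_keys_of_mem_items d hp)
  have hgb : ∀ p ∈ d.items, ∀ n ∈ p.2, 0 ≤ g n ∧ (g n).toNat < size := fun p hp n hn =>
    hbound n (hPre p hp n hn)
  have hm0len : mat0.length = size := by simp [hmat0]
  have hm0rows : ∀ row ∈ mat0, row.length = size := by
    intro row hrow; rw [List.eq_of_mem_replicate hrow]; simp
  have hm0entry : ∀ i j : Nat, ((mat0.getD i []).getD j 0) = 0 := by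
    intro i j
    rw [hmat0]
    rw [show (List.replicate size (List.replicate size (0 : Int))).getD i []
          = if i < size then List.replicate size (0 : Int) else [] from by
        rw [List.getD_eq_getElem?_getD, List.getElem?_replicate]
        split_ifs <;> rfl]
    split_ifs with hi
    · rw [List.getD_eq_getElem?_getD, List.getElem?_replicate]
      split_ifs <;> rfl
    · rfl
  have hcond : ∀ (i : Nat) (hi : i < size) (j : Nat),
      (∃ p ∈ d.items, g p.1 = (i : Int) ∧ ∃ n ∈ p.2, g n = (j : Int))
        ↔ ∃ n ∈ d.getD nodes[i] [], g n = (j : Int) := by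
    intro i hi j
    constructor
    · rintro ⟨p, hp, hgi, n, hn, hgj⟩
      obtain ⟨t, ht, hteq, hgt⟩ := hchar p.1 ((hmemn p.1).mpr (PySem.Dict.mem_keys_of_mem_items d hp))
      have hti : t = i := by omega
      subst hti
      have hpeq : nodes[t] = p.1 := hteq
      have hgetD : d.getD nodes[t] [] = p.2 := by
        rw [hpeq]
        exact PySem.Dict.getD_of_mem_items d (by simpa using hp) hknd []
      exact ⟨n, by rw [hgetD]; exact hn, hgj⟩
    · rintro ⟨n, hn, hgj⟩
      have hki : nodes[i] ∈ d.keys := (hmemn nodes[i]).mp (List.getElem_mem hi)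
      have hsome : (d.get? nodes[i]).isSome := by
        rcases hv : d.get? nodes[i] with _ | v
        · exact absurd ((PySem.Dict.get?_eq_none_iff_not_mem_keys d nodes[i]).mp hv) (not_not_intro hki)
        · rfl
      obtain ⟨v, hv⟩ := Option.isSome_iff_exists.mp hsome
      have hpmem : (nodes[i], v) ∈ d.items := PySem.Dict.mem_items_of_get?_eq_some d hv
      have hgetD : d.getD nodes[i] [] = v := PySem.Dict.getD_of_mem_items d hpmem hknd []
      exact ⟨(nodes[i], v), hpmem, pvNodeIndex_getD nodes hnd i hi, n, by rw [← hgetD]; exact hn, hgj⟩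
  rw [hAdef, hBdef]
  apply List.ext_getElem
  · rw [pvMatFold_shape g d.items mat0 (by intro p hp; rw [hm0len]; exact hkb p hp), hm0len,
      List.length_map]
  · intro i hiA hiB
    have hi : i < size := by simpa using hiB
    have hrowsA : ∀ row ∈ d.items.foldl (fun mat p =>
          p.2.foldl (fun m n =>
            PySem.List.pySetD m (g p.1)
              (PySem.List.pySetD (PySem.List.pyGetD m (g p.1) []) (g n) 1)) mat) mat0,
        row.length = size := pvMatFold_rows g size d.items mat0 hm0len hm0rows hkb
    apply List.ext_getElem
    · rw [hrowsA _ (List.getElem_mem hiA), List.getElem_map, List.length_map,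
        PySem.List.length_pyRange_one]
      omega
    · intro j hjA hjB
      have hj : j < size := by
        rw [hrowsA _ (List.getElem_mem hiA)] at hjA; exact hjA
      have hAentry := pvMatFold_getD g size d.items mat0 hm0len hm0rows hkb hgb i j
      rw [hm0entry i j] at hAentry
      rw [pv_getD_getElem _ i j hiA hjA, hAentry]
      simp only [List.getElem_map, PySem.List.getElem_pyRange_one, zero_add]
      by_cases hc : ∃ n ∈ d.getD nodes[i] [], g n = (j : Int)
      · rw [if_pos ((hcond i hi j).mpr hc), if_pos]
        rw [PySem.Set.contains_iff, PySem.Set.mem_ofList]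
        obtain ⟨n, hn, hgn⟩ := hc
        exact List.mem_map.mpr ⟨n, hn, hgn⟩
      · rw [if_neg (fun h => hc ((hcond i hi j).mp h)), if_neg]
        intro hmem
        rw [PySem.Set.contains_iff, PySem.Set.mem_ofList] at hmem
        obtain ⟨n, hn, hgn⟩ := List.mem_map.mp hmem
        exact hc ⟨n, hn, hgn⟩

-- ===== VERDICT (by name: the statement is the Claim_ definition above) =====
theorem diz_to_mat_spec : Claim_equal_diz_to_mat := by
  intro adj _ hPre
  unfold Spec_diz_to_mat
  exact pv_main adj hPre
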